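-- pv_equiv track=rewrite | github.com/Massprod/leetcode-testing | leetcode_problems/p3917_count_indices_with_opposite_parity.py | count_opposite_parity
-- ===== SOURCE A (Python) =====
-- def count_opposite_parity(nums: list[int]) -> list[int]:
--     # working_solution: (71.73%, 96.21%) -> (3ms, 19.14mb)  Time: O(n) Space: O(1)
--     counts: dict[str, int] = {
--         'odd': 0,
--         'even': 0
--     }
--     for num in nums:
--         if num % 2:
--             counts['odd'] += 1
--         else:
--             counts['even'] += 1
--     out: list[int] = []
--     for num in nums:
--         if num % 2:
--             counts['odd'] -= 1
--             out.append(
--                 counts['even']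
--             )
--         else:
--             counts['even'] -= 1
--             out.append(
--                 counts['odd']
--             )
--
--     return out
-- ===== SOURCE B (Python) =====
-- def count_opposite_parity(nums: list[int]) -> list[int]:
--     # One backward pass maintaining suffix parity counters.
--     n = len(nums)
--     result = [0] * n
--     even_seen = 0
--     odd_seen = 0
--     for i in range(n - 1, -1, -1):
--         if nums[i] % 2:
--             result[i] = even_seen
--             odd_seen += 1
--         else:
--             result[i] = odd_seen
--             even_seen += 1
--     return result
-- ===== Notes on version B (the rewrite author's own statement) =====
-- stated objective: alternative
-- what changed: Replaces A's two forward passes with a dict of draining totals by a single backward pass that maintains running suffix counters of evens and odds already seen.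
import Mathlib
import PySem

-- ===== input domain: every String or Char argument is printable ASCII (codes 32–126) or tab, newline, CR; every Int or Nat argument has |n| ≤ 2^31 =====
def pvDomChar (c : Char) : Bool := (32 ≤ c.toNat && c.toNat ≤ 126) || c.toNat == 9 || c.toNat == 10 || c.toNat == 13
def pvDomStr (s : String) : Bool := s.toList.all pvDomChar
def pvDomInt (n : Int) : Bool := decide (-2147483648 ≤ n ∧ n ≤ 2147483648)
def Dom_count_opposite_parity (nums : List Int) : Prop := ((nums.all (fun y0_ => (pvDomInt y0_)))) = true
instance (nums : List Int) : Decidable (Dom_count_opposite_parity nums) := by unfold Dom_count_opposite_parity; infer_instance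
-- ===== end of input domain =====

-- B replaces A's two forward passes over a dict of draining totals by one backward pass
-- keeping suffix counters (objective: alternative decomposition, same O(n) cost).

-- ===== PORT A =====
-- Literal port of A: a dict {'odd': 0, 'even': 0}, a first pass counting parities,
-- a second pass decrementing the element's own counter and appending the opposite one.
-- The keys 'odd'/'even' are always present, so counts[k] is read with getD (no KeyError possible).
def count_opposite_parity (nums : List Int) : List Int :=
  let counts : PySem.Dict String Int := (PySem.Dict.empty.insert "odd" 0).insert "even" 0
  let counts := nums.foldl (fun c num =>
    if PySem.Int.mod num 2 ≠ 0 then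
      c.insert "odd" (c.getD "odd" 0 + 1)
    else
      c.insert "even" (c.getD "even" 0 + 1)) counts
  let st := nums.foldl (fun (st : PySem.Dict String Int × List Int) num =>
    if PySem.Int.mod num 2 ≠ 0 then
      let c' := st.1.insert "odd" (st.1.getD "odd" 0 - 1)
      (c', st.2 ++ [c'.getD "even" 0])
    else
      let c' := st.1.insert "even" (st.1.getD "even" 0 - 1)
      (c', st.2 ++ [c'.getD "odd" 0])) (counts, ([] : List Int))
  st.2

-- ===== PORT B =====
-- Literal port of B: the backward loop 'for i in range(n-1, -1, -1)' filling result[i]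
-- is the structural recursion from the right; state = (even_seen, odd_seen, suffix of result).
def cop_alt_go (nums : List Int) : Int × Int × List Int :=
  match nums with
  | [] => (0, 0, [])
  | num :: rest =>
    match cop_alt_go rest with
    | (even_seen, odd_seen, result) =>
      if PySem.Int.mod num 2 ≠ 0 then
        (even_seen, odd_seen + 1, even_seen :: result)
      else
        (even_seen + 1, odd_seen, odd_seen :: result)

def count_opposite_parity_alt (nums : List Int) : List Int := (cop_alt_go nums).2.2

-- ===== PRECONDITION & SPEC =====
def Spec_count_opposite_parity (nums : List Int) (out : List Int) : Prop := out = count_opposite_parity_alt nums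
instance (nums : List Int) (out : List Int) : Decidable (Spec_count_opposite_parity nums out) := by unfold Spec_count_opposite_parity; infer_instance

-- ===== CLAIM (what is proved, stated in full; the proofs are below) =====
def Claim_equal_count_opposite_parity : Prop := ∀ (nums : List Int), Dom_count_opposite_parity nums → Spec_count_opposite_parity nums (count_opposite_parity nums)

-- ===== LEMMAS AND PROOFS =====

-- the two-entry dict {'odd': o, 'even': e} as A's loops maintain it
def dOE (o e : Int) : PySem.Dict String Int := PySem.Dict.mk [("odd", o), ("even", e)]

def oc : List Int → Int
  | [] => 0
  | n :: r => (if PySem.Int.mod n 2 ≠ 0 then 1 else 0) + oc r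

def ec : List Int → Int
  | [] => 0
  | n :: r => (if PySem.Int.mod n 2 ≠ 0 then 0 else 1) + ec r

-- A's second loop's appended values, abstracted over the running counters
def gOut : List Int → Int → Int → List Int
  | [], _, _ => []
  | n :: r, o, e =>
    if PySem.Int.mod n 2 ≠ 0 then e :: gOut r (o - 1) e
    else o :: gOut r o (e - 1)

theorem dOE_insert_odd (o e v : Int) : (dOE o e).insert "odd" v = dOE v e := by
  apply PySem.Dict.ext
  simp [dOE, PySem.Dict.items_insert, PySem.Dict.contains_mk]

theorem dOE_insert_even (o e v : Int) : (dOE o e).insert "even" v = dOE o v := by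
  apply PySem.Dict.ext
  simp [dOE, PySem.Dict.items_insert, PySem.Dict.contains_mk]

theorem dOE_getD_odd (o e : Int) : (dOE o e).getD "odd" 0 = o := by
  simp [dOE, PySem.Dict.getD_eq_get?_getD, PySem.Dict.get?_mk_cons]

theorem dOE_getD_even (o e : Int) : (dOE o e).getD "even" 0 = e := by
  simp [dOE, PySem.Dict.getD_eq_get?_getD, PySem.Dict.get?_mk_cons]

theorem loop1_spec (l : List Int) : ∀ o e : Int,
    l.foldl (fun c num =>
      if PySem.Int.mod num 2 ≠ 0 then
        c.insert "odd" (c.getD "odd" 0 + 1)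
      else
        c.insert "even" (c.getD "even" 0 + 1)) (dOE o e)
      = dOE (o + oc l) (e + ec l) := by
  induction l with
  | nil => intro o e; simp [oc, ec]
  | cons n r ih =>
    intro o e
    simp only [List.foldl_cons, oc, ec]
    by_cases h : PySem.Int.mod n 2 ≠ 0
    · rw [if_pos h, if_pos h, if_pos h, dOE_getD_odd, dOE_insert_odd, ih]
      exact congrArg₂ dOE (by ring) (by ring)
    · rw [if_neg h, if_neg h, if_neg h, dOE_getD_even, dOE_insert_even, ih]
      exact congrArg₂ dOE (by ring) (by ring)

theorem loop2_spec (l : List Int) : ∀ (o e : Int) (acc : List Int),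
    l.foldl (fun (st : PySem.Dict String Int × List Int) num =>
      if PySem.Int.mod num 2 ≠ 0 then
        let c' := st.1.insert "odd" (st.1.getD "odd" 0 - 1)
        (c', st.2 ++ [c'.getD "even" 0])
      else
        let c' := st.1.insert "even" (st.1.getD "even" 0 - 1)
        (c', st.2 ++ [c'.getD "odd" 0])) (dOE o e, acc)
      = (dOE (o - oc l) (e - ec l), acc ++ gOut l o e) := by
  induction l with
  | nil => intro o e acc; simp [oc, ec, gOut]
  | cons n r ih =>
    intro o e acc
    simp only [List.foldl_cons, oc, ec, gOut]
    by_cases h : PySem.Int.mod n 2 ≠ 0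
    · rw [if_pos h, if_pos h, if_pos h, if_pos h]
      simp only [dOE_getD_odd, dOE_getD_even, dOE_insert_odd, ih, Prod.mk.injEq]
      refine ⟨congrArg₂ dOE (by ring) (by ring), ?_⟩
      simp
    · rw [if_neg h, if_neg h, if_neg h, if_neg h]
      simp only [dOE_getD_odd, dOE_getD_even, dOE_insert_even, ih, Prod.mk.injEq]
      refine ⟨congrArg₂ dOE (by ring) (by ring), ?_⟩
      simp

theorem alt_go_spec (l : List Int) : cop_alt_go l = (ec l, oc l, gOut l (oc l) (ec l)) := by
  induction l with
  | nil => simp [cop_alt_go, oc, ec, gOut]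
  | cons n r ih =>
    simp only [cop_alt_go, ih, oc, ec, gOut]
    by_cases h : PySem.Int.mod n 2 ≠ 0
    · rw [if_pos h, if_pos h, if_pos h, if_pos h]
      simp only [Prod.mk.injEq]
      refine ⟨by ring, by ring, ?_⟩
      norm_num
    · rw [if_neg h, if_neg h, if_neg h, if_neg h]
      simp only [Prod.mk.injEq]
      refine ⟨by ring, by ring, ?_⟩
      norm_num

-- ===== VERDICT (by name: the statement is the Claim_ definition above) =====
theorem count_opposite_parity_spec : Claim_equal_count_opposite_parity := by
  intro nums _
  show count_opposite_parity nums = count_opposite_parity_alt nums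
  have hinit : (PySem.Dict.empty.insert "odd" (0:Int)).insert "even" 0 = dOE 0 0 := by decide
  unfold count_opposite_parity count_opposite_parity_alt
  rw [hinit]
  simp only [loop1_spec, loop2_spec, alt_go_spec]
  simp
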